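-- pv_equiv track=rewrite | github.com/bcking92/TIL | 01_Algorithm/Week6/서울1반8월8일김병철/nasa.py | connect_nasa
-- ===== SOURCE A (Python) =====
-- def connect_nasa(nasas):
--     max_len = []
--     result = ''
--     for i in range(0,len(nasas),2):
--         used_nasa = []
--         now_nasa = [nasas[i], nasas[i + 1]]
--         used_nasa.append(i)
--         while True:
--             for j in range(0,len(nasas), 2):
--                 if j not in used_nasa:
--                     if nasas[j] == now_nasa[-1]:
--                         now_nasa.append(nasas[j])
--                         now_nasa.append(nasas[j+1])
--                         used_nasa.append(j)
--                         break
--             else: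
--                 break
--         if len(max_len) < len(now_nasa):
--             max_len = now_nasa
--     for i in max_len:
--         result += str(i)+' '
--     return result
-- ===== SOURCE B (Python) =====
-- def connect_nasa(nasas):
--     n = len(nasas)
--     groups = {}
--     for j in range(0, n - 1, 2):
--         groups.setdefault(nasas[j], []).append(j)
--     best = []
--     for i in range(0, n, 2):
--         iters = {}
--         chain = [nasas[i], nasas[i + 1]]
--         while True:
--             tail = chain[-1]
--             it = iters.get(tail)
--             if it is None:
--                 it = iter([j for j in groups.get(tail, ()) if j != i])
--                 iters[tail] = it
--             j = next(it, None)
--             if j is None: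
--                 break
--             chain.append(nasas[j])
--             chain.append(nasas[j + 1])
--         if len(best) < len(chain):
--             best = chain
--     return ''.join(x + ' ' for x in best)
-- ===== Notes on version B (the rewrite author's own statement) =====
-- stated objective: faster
-- what changed: Replaces A's per-step rescan (inner for-loop over all pair indices with an O(n) 'j not in used' list test) by a dict built once grouping pair indices by their first value, consumed per start from the front via lazily created iterators, so each chain step is a dict lookup.
import Mathlib
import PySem

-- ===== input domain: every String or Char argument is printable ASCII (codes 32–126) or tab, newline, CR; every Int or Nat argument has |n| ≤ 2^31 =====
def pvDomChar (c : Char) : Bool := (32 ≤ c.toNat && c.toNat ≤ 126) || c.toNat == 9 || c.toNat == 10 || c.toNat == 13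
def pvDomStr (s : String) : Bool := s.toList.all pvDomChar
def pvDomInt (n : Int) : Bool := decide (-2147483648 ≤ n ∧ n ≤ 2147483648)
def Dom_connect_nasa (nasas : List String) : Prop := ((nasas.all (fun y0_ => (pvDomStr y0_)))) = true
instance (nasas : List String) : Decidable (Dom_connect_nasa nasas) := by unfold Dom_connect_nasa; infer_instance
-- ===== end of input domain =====

-- B replaces A's O(n)-scan-with-used-list greedy step by a dict built once that groups the
-- pair indices by their first value; per start the group of a value is consumed from the front
-- through a lazily created iterator (i filtered out at creation), removing the inner scans;
-- objective: faster (asymptotic). Like A, B raises IndexError on odd-length input (nasas[i+1]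
-- at the last start), which is why odd lengths are outside Pre_.

-- ===== PORT A =====
-- the for-j/else loop body: first even index j with j not in used and nasas[j] == tail
def connectFindA (nasas : List String) (used : List Int) (tail : String) : Option Int :=
  (PySem.List.pyRange 0 (nasas.length : Int) 2).find?
    (fun j => !used.contains j && PySem.List.pyGetD nasas j "" == tail)

-- the 'while True' loop; fuel bounds the iterations (each success uses a fresh even index,
-- so nasas.length + 1 steps always suffice)
def connectLoopA (nasas : List String) : Nat → List String → List Int → List String
  | 0, now, _ => now
  | fuel+1, now, used =>
    match connectFindA nasas used (PySem.List.pyGetD now (-1) "") with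
    | none => now
    | some j =>
      connectLoopA nasas fuel
        (now ++ [PySem.List.pyGetD nasas j "", PySem.List.pyGetD nasas (j+1) ""])
        (used ++ [j])

def connect_nasa (nasas : List String) : String :=
  let maxLen := (PySem.List.pyRange 0 (nasas.length : Int) 2).foldl
    (fun maxLen i =>
      let now := connectLoopA nasas (nasas.length + 1)
        [PySem.List.pyGetD nasas i "", PySem.List.pyGetD nasas (i+1) ""] [i]
      if maxLen.length < now.length then now else maxLen) []
  maxLen.foldl (fun result s => result ++ s ++ " ") ""

-- ===== PORT B =====
-- groups = {value: [indices j of complete pairs with nasas[j] == value]}  (built once)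
def connectGroupsB (nasas : List String) : PySem.Dict String (List Int) :=
  (PySem.List.pyRange 0 ((nasas.length : Int) - 1) 2).foldl
    (fun d j => d.modify (PySem.List.pyGetD nasas j "") [] (· ++ [j]))
    PySem.Dict.empty

-- 'it = iters.get(tail); if it is None: it = iter([j for j in groups.get(tail, ()) if j != i])':
-- the pending indices for tail (a Python iterator is ported as the list it has left to yield)
def connectPendB (groups : PySem.Dict String (List Int)) (i : Int)
    (iters : PySem.Dict String (List Int)) (tail : String) : List Int :=
  match iters.get? tail with
  | some l => l
  | none => (groups.getD tail []).filter (fun j => !(j == i))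

-- the 'while True' loop; next(it, None) consumes the head, the advanced iterator is what
-- iters holds for tail afterwards (iters.insert); same fuel bound as A
def connectLoopB (nasas : List String) (groups : PySem.Dict String (List Int)) (i : Int) :
    Nat → List String → PySem.Dict String (List Int) → List String
  | 0, chain, _ => chain
  | fuel+1, chain, iters =>
    match connectPendB groups i iters (PySem.List.pyGetD chain (-1) "") with
    | [] => chain
    | j :: rest =>
      connectLoopB nasas groups i fuel
        (chain ++ [PySem.List.pyGetD nasas j "", PySem.List.pyGetD nasas (j+1) ""])
        (iters.insert (PySem.List.pyGetD chain (-1) "") rest)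

def connect_nasa_alt (nasas : List String) : String :=
  let groups := connectGroupsB nasas
  let best := (PySem.List.pyRange 0 (nasas.length : Int) 2).foldl
    (fun best i =>
      let chain := connectLoopB nasas groups i (nasas.length + 1)
        [PySem.List.pyGetD nasas i "", PySem.List.pyGetD nasas (i+1) ""]
        PySem.Dict.empty
      if best.length < chain.length then chain else best) []
  PySem.Str.join "" (best.map (fun x => x ++ " "))

-- ===== PRECONDITION & SPEC =====
-- Pre_ excludes odd-length lists only: there both Pythons raise IndexError at nasas[i+1].
def Pre_connect_nasa (nasas : List String) : Prop := nasas.length % 2 = 0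
instance (nasas : List String) : Decidable (Pre_connect_nasa nasas) := by unfold Pre_connect_nasa; infer_instance
def pvWitness_connect_nasa : List String := ["a", "b", "b", "c"]
def Spec_connect_nasa (nasas : List String) (out : String) : Prop := out = connect_nasa_alt nasas
instance (nasas : List String) (out : String) : Decidable (Spec_connect_nasa nasas out) := by unfold Spec_connect_nasa; infer_instance

-- ===== CLAIM (what is proved, stated in full; the proofs are below) =====
def Claim_equal_connect_nasa : Prop := ∀ (nasas : List String), Dom_connect_nasa nasas → Pre_connect_nasa nasas → Spec_connect_nasa nasas (connect_nasa nasas)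

-- ===== LEMMAS AND PROOFS =====

-- inside Pre_ (even length) B's pair range over n-1 is A's range over n
lemma range_drop_one (nasas : List String) (hpre : nasas.length % 2 = 0) :
    PySem.List.pyRange 0 ((nasas.length : Int) - 1) 2 =
      PySem.List.pyRange 0 (nasas.length : Int) 2 := by
  rw [PySem.List.pyRange_of_pos _ _ (by norm_num : (0:Int) < 2),
    PySem.List.pyRange_of_pos _ _ (by norm_num : (0:Int) < 2)]
  congr 1
  rcases Nat.eq_zero_or_pos nasas.length with h0 | hp
  · simp [h0]
  · have hn2 : 2 ≤ nasas.length := by omega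
    rw [if_pos (by omega), if_pos (by omega)]
    congr 1
    have hc : ((nasas.length : Int)) % 2 = 0 := by omega
    omega

lemma nodup_evens (nasas : List String) :
    (PySem.List.pyRange 0 (nasas.length : Int) 2).Nodup := by
  rw [PySem.List.pyRange_of_pos _ _ (by norm_num : (0:Int) < 2)]
  exact List.nodup_range.map (fun a b h => by omega)

lemma gv_groups (nasas : List String) (v : String) :
    (connectGroupsB nasas).getD v [] =
      (PySem.List.pyRange 0 ((nasas.length : Int) - 1) 2).filter
        (fun j => PySem.List.pyGetD nasas j "" == v) := by
  unfold connectGroupsB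
  have h1 : ((PySem.List.pyRange 0 ((nasas.length : Int) - 1) 2).foldl
      (fun d j => d.modify (PySem.List.pyGetD nasas j "") [] (· ++ [j]))
      PySem.Dict.empty) =
      ((PySem.List.pyRange 0 ((nasas.length : Int) - 1) 2).map
        (fun j => (PySem.List.pyGetD nasas j "", j))).foldl
        (fun d p => d.modify p.1 [] (· ++ [p.2])) PySem.Dict.empty := by
    rw [List.foldl_map]
  rw [h1, PySem.Dict.getD_foldl_modify_append]
  simp [PySem.Dict.getD_empty, List.filter_map, Function.comp_def]

lemma loop_eq (nasas : List String) (groups : PySem.Dict String (List Int)) (i : Int)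
    (fuel : Nat) :
    ∀ (chain : List String) (used : List Int) (iters : PySem.Dict String (List Int)),
    (∀ v, connectPendB groups i iters v =
        (PySem.List.pyRange 0 (nasas.length : Int) 2).filter
          (fun j => !used.contains j && PySem.List.pyGetD nasas j "" == v)) →
    connectLoopA nasas fuel chain used = connectLoopB nasas groups i fuel chain iters := by
  induction fuel with
  | zero => intro chain used iters _; rfl
  | succ n ih =>
    intro chain used iters hinv
    simp only [connectLoopA, connectLoopB]
    have hfind : connectFindA nasas used (PySem.List.pyGetD chain (-1) "") =
        (connectPendB groups i iters (PySem.List.pyGetD chain (-1) "")).head? := by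
      rw [hinv, connectFindA, ← List.head?_filter]
    cases hd : connectPendB groups i iters (PySem.List.pyGetD chain (-1) "") with
    | nil =>
      rw [hd] at hfind
      simp only [List.head?_nil] at hfind
      rw [hfind]
    | cons j rest =>
      rw [hd] at hfind
      simp only [List.head?_cons] at hfind
      rw [hfind]
      apply ih
      -- new invariant
      intro v
      have htail := hinv (PySem.List.pyGetD chain (-1) "")
      rw [hd] at htail
      have hnodup : ((PySem.List.pyRange 0 (nasas.length : Int) 2).filter
          (fun k => !used.contains k && PySem.List.pyGetD nasas k "" ==
            PySem.List.pyGetD chain (-1) "")).Nodup :=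
        (nodup_evens nasas).filter _
      rw [← htail] at hnodup
      have hjrest : j ∉ rest := by
        intro hmem
        exact (List.nodup_cons.mp hnodup).1 hmem
      have hsplit : (PySem.List.pyRange 0 (nasas.length : Int) 2).filter
          (fun k => !(used ++ [j]).contains k && PySem.List.pyGetD nasas k "" == v) =
          ((PySem.List.pyRange 0 (nasas.length : Int) 2).filter
            (fun k => !used.contains k && PySem.List.pyGetD nasas k "" == v)).filter
            (fun k => !(k == j)) := by
        rw [List.filter_filter]
        apply List.filter_congr
        intro k _
        by_cases h1 : k ∈ used <;> by_cases h2 : k = j <;>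
          simp [h1, h2]
      rw [hsplit]
      by_cases hv : v = PySem.List.pyGetD chain (-1) ""
      · subst hv
        unfold connectPendB
        rw [PySem.Dict.get?_insert_self]
        simp only []
        rw [← htail]
        have hstep : List.filter (fun k => !(k == j)) (j :: rest) = rest := by
          simp only [List.filter_cons, beq_self_eq_true, Bool.not_true, Bool.false_eq_true,
            if_false]
          exact List.filter_eq_self.mpr (fun k hk => by
            simp only [Bool.not_eq_true', beq_eq_false_iff_ne]
            intro h; subst h; exact hjrest hk)
        rw [hstep]
      · have hsame : connectPendB groups i (iters.insert (PySem.List.pyGetD chain (-1) "") rest) v =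
            connectPendB groups i iters v := by
          unfold connectPendB
          rw [PySem.Dict.get?_insert_of_ne iters rest hv]
        rw [hsame, hinv v]
        refine (List.filter_eq_self.mpr ?_).symm
        intro k hk
        simp only [Bool.not_eq_true', beq_eq_false_iff_ne]
        intro hkj
        subst hkj
        have h1 : PySem.List.pyGetD nasas k "" = v := by
          have := List.of_mem_filter hk
          simp only [Bool.and_eq_true, beq_iff_eq] at this
          exact this.2
        have h2 : k ∈ List.filter
            (fun j => !used.contains j && PySem.List.pyGetD nasas j "" ==
              PySem.List.pyGetD chain (-1) "") (PySem.List.pyRange 0 (nasas.length : Int) 2) := by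
          rw [← htail]; exact List.mem_cons_self
        have h3 : PySem.List.pyGetD nasas k "" = PySem.List.pyGetD chain (-1) "" := by
          have := List.of_mem_filter h2
          simp only [Bool.and_eq_true, beq_iff_eq] at this
          exact this.2
        exact hv (by rw [← h1, h3])

lemma join_empty_sep (parts : List (List Char)) :
    PySem.Chars.join [] parts = parts.flatten := by
  induction parts with
  | nil => simp [PySem.Chars.join_nil]
  | cons p rest ih =>
    cases rest with
    | nil => simp [PySem.Chars.join_singleton]
    | cons q t =>
      rw [PySem.Chars.join_cons_cons]
      simp [ih]

lemma foldl_spaces_toList (l : List String) (init : String) :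
    (l.foldl (fun result s => result ++ s ++ " ") init).toList =
      init.toList ++ (l.map (fun s => s.toList ++ [' '])).flatten := by
  induction l generalizing init with
  | nil => simp
  | cons x xs ih => simp [ih, String.toList_append]

lemma join_spaces (l : List String) :
    PySem.Str.join "" (l.map (fun x => x ++ " ")) =
      l.foldl (fun result s => result ++ s ++ " ") "" := by
  apply String.toList_inj.mp
  rw [PySem.Str.toList_join, foldl_spaces_toList]
  have h0 : "".toList = ([] : List Char) := rfl
  rw [h0, join_empty_sep]
  simp [Function.comp_def, String.toList_append]

-- ===== VERDICT (by name: the statement is the Claim_ definition above) =====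
set_option maxRecDepth 4096 in
theorem connect_nasa_spec : Claim_equal_connect_nasa := by
  intro nasas _ hpre
  unfold Spec_connect_nasa connect_nasa connect_nasa_alt
  rw [← join_spaces]
  congr 2
  apply List.foldl_ext
  intro acc i _
  have hinv : ∀ v, connectPendB (connectGroupsB nasas) i PySem.Dict.empty v =
      (PySem.List.pyRange 0 (nasas.length : Int) 2).filter
        (fun j => !([i] : List Int).contains j && PySem.List.pyGetD nasas j "" == v) := by
    intro v
    unfold connectPendB
    rw [PySem.Dict.get?_empty, gv_groups, range_drop_one nasas hpre, List.filter_filter]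
    apply List.filter_congr
    intro j _
    by_cases h : j = i <;> simp [h]
  rw [loop_eq nasas (connectGroupsB nasas) i (nasas.length + 1)
    [PySem.List.pyGetD nasas i "", PySem.List.pyGetD nasas (i+1) ""] [i]
    PySem.Dict.empty hinv]
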